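-- pv_equiv track=rewrite | github.com/tardis-key/siiRL | siirl/workers/databuffer/data_buffer.py | get_seqlen_balanced_partitions_constrained_lpt
-- ===== SOURCE A (Python) =====
-- import heapq
-- from typing import Dict, List, Optional, Tuple, Union
--
-- def get_seqlen_balanced_partitions_constrained_lpt(seqlen_list: List[int], k_partitions: int) -> List[List[int]]:
--     """Partitions items into k subsets of equal item count with balanced sums.
--
--     This function implements a constrained version of the LPT (Longest
--     Processing Time) heuristic. It strictly adheres to the constraint that each
--     partition must have a nearly equal number of items, and then uses the LPT
--     principle to balance the sum of sequence lengths within that constraint.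
--
--     This is the recommended approach when a fixed number of items per worker
--     is a hard requirement.
--
--     Args:
--         seqlen_list: A list of integers representing the "size" of each item.
--         k_partitions: The desired number of partitions.
--
--     Returns:
--         A list of lists, where each inner list contains the original indices
--         of the items assigned to that partition. Each list will have a size of
--         len(seqlen_list) // k or len(seqlen_list) // k + 1.
--     """
--     if k_partitions <= 0:
--         raise ValueError("Number of partitions (k_partitions) must be positive.")
--
--     num_items = len(seqlen_list)
--
--     # Enforce the guarantee that the data size is perfectly divisible.
--     # If this ever fails, it indicates an unexpected issue in the data pipeline.
--     assert num_items % k_partitions == 0, f"Data size ({num_items}) is not evenly divisible by the number of partitions ({k_partitions}). The system expects data to be perfectly divisible."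
--
--     # 1. Sort items by length in descending order, preserving original indices.
--     indexed_lengths = sorted(enumerate(seqlen_list), key=lambda x: x[1], reverse=True)
--
--     # 2. Determine the target number of items for each partition.
--     base_size = num_items // k_partitions
--     rem = num_items % k_partitions
--     partition_target_sizes = [base_size + 1] * rem + [base_size] * (k_partitions - rem)
--
--     # 3. Initialize partitions and a min-heap to track partition sums.
--     #    The heap stores tuples of (current_sum, partition_index).
--     partitions = [[] for _ in range(k_partitions)]
--     partition_heap = [(0, i) for i in range(k_partitions)]
--     heapq.heapify(partition_heap)
--
--     # A temporary list to hold partitions that become full.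
--     full_partitions = []
--
--     # 4. Iterate through sorted items and assign each to a non-full partition
--     #    with the smallest current sum.
--     for original_idx, length in indexed_lengths:
--         # Find the smallest, non-full partition.
--         # Pop from the heap until we find a partition that is not yet full.
--
--         # This loop is guaranteed to find a non-full partition because the total
--         # number of items equals the sum of all target sizes.
--         while True:
--             smallest_sum, smallest_idx = heapq.heappop(partition_heap)
--
--             # Check if the selected partition is already full.
--             if len(partitions[smallest_idx]) < partition_target_sizes[smallest_idx]:
--                 # This partition is not full, so we can assign the item.
--                 partitions[smallest_idx].append(original_idx)
--                 new_sum = smallest_sum + length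
--
--                 # If the partition is still not full after adding, push it back.
--                 if len(partitions[smallest_idx]) < partition_target_sizes[smallest_idx]:
--                     heapq.heappush(partition_heap, (new_sum, smallest_idx))
--                 break
--             else:
--                 # This partition is full. Add it to a temporary list to be
--                 # re-added to the heap later if necessary (though not strictly needed
--                 # with this logic, it's good practice for other variations).
--                 full_partitions.append((smallest_sum, smallest_idx))
--
--     return partitions
-- ===== SOURCE B (Python) =====
-- def get_seqlen_balanced_partitions_constrained_lpt(seqlen_list, k_partitions):
--     """Same constrained-LPT assignment as A, but with a plain linear scan of
--     partition sums instead of a heap: for each item (longest first) pick the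
--     not-yet-full partition with the smallest sum (lowest index on ties)."""
--     if k_partitions <= 0:
--         raise ValueError("Number of partitions (k_partitions) must be positive.")
--     num_items = len(seqlen_list)
--     assert num_items % k_partitions == 0, f"Data size ({num_items}) is not evenly divisible by the number of partitions ({k_partitions}). The system expects data to be perfectly divisible."
--     order = sorted(enumerate(seqlen_list), key=lambda x: x[1], reverse=True)
--     target = num_items // k_partitions
--     partitions = [[] for _ in range(k_partitions)]
--     sums = [0] * k_partitions
--     for original_idx, length in order:
--         best = -1
--         for i in range(k_partitions):
--             if len(partitions[i]) < target and (best < 0 or sums[i] < sums[best]):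
--                 best = i
--         partitions[best].append(original_idx)
--         sums[best] += length
--     return partitions
-- ===== Notes on version B (the rewrite author's own statement) =====
-- stated objective: simpler
-- what changed: B drops the heap entirely: instead of maintaining a priority queue of (sum, index) pairs with pop/push and a full-partition retry loop, it keeps a plain sums list and, for each item in descending length order, picks the not-yet-full partition with the smallest sum (lowest index on ties) by a direct linear scan.
import Mathlib
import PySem

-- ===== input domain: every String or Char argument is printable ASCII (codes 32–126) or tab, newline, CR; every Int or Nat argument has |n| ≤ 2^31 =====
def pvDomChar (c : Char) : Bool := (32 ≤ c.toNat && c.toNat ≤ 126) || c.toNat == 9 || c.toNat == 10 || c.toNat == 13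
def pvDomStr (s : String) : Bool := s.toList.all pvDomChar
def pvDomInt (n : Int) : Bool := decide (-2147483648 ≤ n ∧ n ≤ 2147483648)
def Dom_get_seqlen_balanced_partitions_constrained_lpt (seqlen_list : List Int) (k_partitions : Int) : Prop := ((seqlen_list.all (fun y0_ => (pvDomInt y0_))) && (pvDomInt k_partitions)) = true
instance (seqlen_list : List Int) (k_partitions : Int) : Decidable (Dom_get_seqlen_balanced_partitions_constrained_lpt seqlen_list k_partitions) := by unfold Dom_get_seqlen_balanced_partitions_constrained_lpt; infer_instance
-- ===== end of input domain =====

-- B replaces A's heap by a plain linear scan of partition sums (simpler data structure, same result).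
-- Return-value equivalence only; neither version mutates its arguments.

-- ===== PORT A =====
-- Python tuple '<' on (sum, index) pairs: lexicographic.
def pvLexLt (a b : Int × Int) : Bool := a.1 < b.1 || (a.1 == b.1 && a.2 < b.2)

-- heapq model: the heap list is kept sorted ascending in tuple order; heappush is an ordered
-- insert, heappop takes the head, heapify sorts.  This is observationally exact for A's heap:
-- its elements always carry pairwise-distinct partition indices, so every minimum is unique and
-- heapq's pop/push behaviour is determined by the multiset of contents alone.
def pvHeapPush (h : List (Int × Int)) (x : Int × Int) : List (Int × Int) :=
  PySem.List.insertBy (fun a b => pvLexLt a b) x h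

def pvHeapify (l : List (Int × Int)) : List (Int × Int) :=
  l.foldl (fun acc x => PySem.List.insertBy (fun a b => pvLexLt a b) x acc) []

-- the 'while True' pop-assign loop of A (structural recursion on the heap; the [] case is
-- unreachable under Pre_: there Python's heappop would raise IndexError).
def pvAssign (parts : List (List Int)) (heap full : List (Int × Int))
    (sizes : List Int) (original_idx length : Int) :
    List (List Int) × List (Int × Int) × List (Int × Int) :=
  match heap with
  | [] => (parts, [], full)
  | (smallest_sum, smallest_idx) :: rest =>
      let j := smallest_idx.toNat
      if ((parts.getD j []).length : Int) < sizes.getD j 0 then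
        let parts' := parts.set j ((parts.getD j []) ++ [original_idx])
        let new_sum := smallest_sum + length
        let heap' := if ((parts'.getD j []).length : Int) < sizes.getD j 0 then
            pvHeapPush rest (new_sum, smallest_idx) else rest
        (parts', heap', full)
      else
        pvAssign parts rest (full ++ [(smallest_sum, smallest_idx)]) sizes original_idx length

def get_seqlen_balanced_partitions_constrained_lpt (seqlen_list : List Int) (k_partitions : Int) : List (List Int) :=
  if k_partitions ≤ 0 then []  -- Python: raise ValueError (excluded by Pre_)
  else
    let num_items : Int := (seqlen_list.length : Int)
    if PySem.Int.mod num_items k_partitions ≠ 0 then []  -- Python: AssertionError (excluded by Pre_)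
    else
      let indexed_lengths := PySem.List.sorted (PySem.List.enumerate seqlen_list) (fun x => x.2) true
      let base_size := PySem.Int.floordiv num_items k_partitions
      let rem := PySem.Int.mod num_items k_partitions
      let k' := k_partitions.toNat
      let target_sizes : List Int :=
        List.replicate rem.toNat (base_size + 1) ++ List.replicate (k' - rem.toNat) base_size
      let partitions : List (List Int) := List.replicate k' []
      let heap := pvHeapify ((List.range k').map (fun (i : Nat) => ((0 : Int), (i : Int))))
      (indexed_lengths.foldl
        (fun st il => pvAssign st.1 st.2.1 st.2.2 target_sizes il.1 il.2)
        (partitions, heap, ([] : List (Int × Int)))).1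

-- ===== PORT B =====
-- the inner 'for i in range(k)' scan: smallest sum among not-yet-full partitions, lowest index on ties.
def pvBest (parts : List (List Int)) (sums : List Int) (target : Int) (k' : Nat) : Int :=
  (List.range k').foldl
    (fun best i =>
      if ((parts.getD i []).length : Int) < target ∧
         (best < 0 ∨ sums.getD i 0 < sums.getD best.toNat 0) then (i : Int) else best)
    (-1)

def get_seqlen_balanced_partitions_constrained_lpt_alt (seqlen_list : List Int) (k_partitions : Int) : List (List Int) :=
  if k_partitions ≤ 0 then []  -- Python: raise ValueError (excluded by Pre_)
  else
    let num_items : Int := (seqlen_list.length : Int)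
    if PySem.Int.mod num_items k_partitions ≠ 0 then []  -- Python: AssertionError (excluded by Pre_)
    else
      let order := PySem.List.sorted (PySem.List.enumerate seqlen_list) (fun x => x.2) true
      let target := PySem.Int.floordiv num_items k_partitions
      let k' := k_partitions.toNat
      (order.foldl
        (fun (st : List (List Int) × List Int) il =>
          let b := (pvBest st.1 st.2 target k').toNat
          (st.1.set b ((st.1.getD b []) ++ [il.1]), st.2.set b (st.2.getD b 0 + il.2)))
        (List.replicate k' [], List.replicate k' (0 : Int))).1

-- ===== PRECONDITION & SPEC =====
-- Pre_ excludes exactly the inputs where A raises: k_partitions ≤ 0 (ValueError) and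
-- len(seqlen_list) not divisible by k_partitions (AssertionError).
def Pre_get_seqlen_balanced_partitions_constrained_lpt (seqlen_list : List Int) (k_partitions : Int) : Prop :=
  0 < k_partitions ∧ PySem.Int.mod (seqlen_list.length : Int) k_partitions = 0
instance (seqlen_list : List Int) (k_partitions : Int) : Decidable (Pre_get_seqlen_balanced_partitions_constrained_lpt seqlen_list k_partitions) := by unfold Pre_get_seqlen_balanced_partitions_constrained_lpt; infer_instance
def pvWitness_get_seqlen_balanced_partitions_constrained_lpt : List Int × Int := ([3, 1, 2, 4, 2, 2], 2)

def Spec_get_seqlen_balanced_partitions_constrained_lpt (seqlen_list : List Int) (k_partitions : Int) (out : List (List Int)) : Prop := out = get_seqlen_balanced_partitions_constrained_lpt_alt seqlen_list k_partitions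
instance (seqlen_list : List Int) (k_partitions : Int) (out : List (List Int)) : Decidable (Spec_get_seqlen_balanced_partitions_constrained_lpt seqlen_list k_partitions out) := by unfold Spec_get_seqlen_balanced_partitions_constrained_lpt; infer_instance

-- ===== CLAIM (what is proved, stated in full; the proofs are below) =====
def Claim_equal_get_seqlen_balanced_partitions_constrained_lpt : Prop := ∀ (seqlen_list : List Int) (k_partitions : Int), Dom_get_seqlen_balanced_partitions_constrained_lpt seqlen_list k_partitions → Pre_get_seqlen_balanced_partitions_constrained_lpt seqlen_list k_partitions → Spec_get_seqlen_balanced_partitions_constrained_lpt seqlen_list k_partitions (get_seqlen_balanced_partitions_constrained_lpt seqlen_list k_partitions)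

-- ===== LEMMAS AND PROOFS =====
lemma pvLexLt_true_iff (a b : Int × Int) : pvLexLt a b = true ↔ (a.1 < b.1 ∨ (a.1 = b.1 ∧ a.2 < b.2)) := by
  simp [pvLexLt]

lemma pvLexLt_false_iff (a b : Int × Int) : pvLexLt a b = false ↔ (b.1 < a.1 ∨ (b.1 = a.1 ∧ b.2 ≤ a.2)) := by
  simp [pvLexLt]; omega

lemma pvLexLt_antisymm {a b : Int × Int} (h1 : pvLexLt a b = false) (h2 : pvLexLt b a = false) : a = b := by
  rw [pvLexLt_false_iff] at h1 h2
  obtain ⟨a1, a2⟩ := a; obtain ⟨b1, b2⟩ := b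
  simp_all; omega

lemma pvLexLt_lt_of_lt_of_ge {x y z : Int × Int} (h1 : pvLexLt x y = true) (h2 : pvLexLt z y = false) :
    pvLexLt z x = false := by
  rw [pvLexLt_true_iff] at h1; rw [pvLexLt_false_iff] at h2 ⊢; omega

lemma pvInsertBy_perm (x : Int × Int) (h : List (Int × Int)) :
    (PySem.List.insertBy (fun a b => pvLexLt a b) x h).Perm (x :: h) := by
  induction h with
  | nil => simp [PySem.List.insertBy]
  | cons y t ih =>
      rw [PySem.List.insertBy]
      split
      · exact List.Perm.refl _
      · exact (ih.cons y).trans (List.Perm.swap x y t)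

lemma pvInsertBy_pairwise (x : Int × Int) (h : List (Int × Int))
    (hp : h.Pairwise (fun a b => pvLexLt b a = false)) :
    (PySem.List.insertBy (fun a b => pvLexLt a b) x h).Pairwise (fun a b => pvLexLt b a = false) := by
  induction h with
  | nil => simp [PySem.List.insertBy]
  | cons y t ih =>
      rw [PySem.List.insertBy]
      rcases List.pairwise_cons.mp hp with ⟨hy, ht⟩
      split
      · rename_i hxy
        refine List.pairwise_cons.mpr ⟨?_, hp⟩
        intro z hz
        rcases List.mem_cons.mp hz with rfl | hz
        · exact pvLexLt_lt_of_lt_of_ge hxy (by rw [pvLexLt_false_iff]; omega)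
        · exact pvLexLt_lt_of_lt_of_ge hxy (hy _ hz)
      · rename_i hxy
        refine List.pairwise_cons.mpr ⟨?_, ih ht⟩
        intro z hz
        rcases (PySem.List.mem_insertBy _ _ _ _).mp hz with rfl | hz
        · simpa using hxy
        · exact hy _ hz

lemma pvHeapify_aux (l acc : List (Int × Int)) (hp : acc.Pairwise (fun a b => pvLexLt b a = false)) :
    (l.foldl (fun acc x => PySem.List.insertBy (fun a b => pvLexLt a b) x acc) acc).Perm (acc ++ l) ∧
    (l.foldl (fun acc x => PySem.List.insertBy (fun a b => pvLexLt a b) x acc) acc).Pairwise (fun a b => pvLexLt b a = false) := by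
  induction l generalizing acc with
  | nil => exact ⟨by simpa using List.Perm.refl acc, hp⟩
  | cons x l ih =>
      simp only [List.foldl_cons]
      obtain ⟨h1, h2⟩ := ih (PySem.List.insertBy (fun a b => pvLexLt a b) x acc) (pvInsertBy_pairwise x acc hp)
      exact ⟨h1.trans (((pvInsertBy_perm x acc).append_right l).trans List.perm_middle.symm), h2⟩

lemma pvHeapify_perm (l : List (Int × Int)) : (pvHeapify l).Perm l :=
  (pvHeapify_aux l [] (by simp)).1

lemma pvHeapify_pairwise (l : List (Int × Int)) :
    (pvHeapify l).Pairwise (fun a b => pvLexLt b a = false) :=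
  (pvHeapify_aux l [] (by simp)).2
-- the (sum, index) pairs of the not-yet-full partitions, in index order
def pvF (target : Int) (parts : List (List Int)) (sums : List Int) (i : Nat) : Option (Int × Int) :=
  if ((parts.getD i []).length : Int) < target then some (sums.getD i 0, (i : Int)) else none

def pvLst (k' : Nat) (target : Int) (parts : List (List Int)) (sums : List Int) : List (Int × Int) :=
  (List.range k').filterMap (pvF target parts sums)

def pvCap (k' : Nat) (target : Int) (parts : List (List Int)) : Int :=
  ((List.range k').map (fun i => target - ((parts.getD i []).length : Int))).sum

lemma pvGetD_set_ne {α : Type} (l : List α) (j i : Nat) (v : α) (d : α) (h : i ≠ j) :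
    (l.set j v).getD i d = l.getD i d := by
  simp [List.getD_eq_getElem?_getD, List.getElem?_set_ne (Ne.symm h)]

lemma pvGetD_set_self {α : Type} (l : List α) (j : Nat) (v : α) (d : α) (h : j < l.length) :
    (l.set j v).getD j d = v := by
  simp [List.getD_eq_getElem?_getD, h]

lemma pvRange_split (k' j : Nat) (hj : j < k') :
    List.range k' = List.range' 0 j ++ j :: List.range' (j + 1) (k' - j - 1) := by
  have h := List.range'_append (s := 0) (m := j) (n := k' - j) (step := 1)
  simp only [Nat.one_mul, Nat.zero_add] at h
  have h2 : j + (k' - j) = k' := by omega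
  rw [h2] at h
  rw [List.range_eq_range', ← h]
  congr 1
  have h3 : k' - j = (k' - j - 1) + 1 := by omega
  rw [h3, List.range'_succ]
  norm_num

lemma pvMem_pvLst {k' : Nat} {target : Int} {parts : List (List Int)} {sums : List Int} {y : Int × Int} :
    y ∈ pvLst k' target parts sums ↔
      ∃ i, i < k' ∧ ((parts.getD i []).length : Int) < target ∧ y = (sums.getD i 0, (i : Int)) := by
  simp only [pvLst, List.mem_filterMap, List.mem_range]
  constructor
  · rintro ⟨i, hi, hf⟩
    by_cases he : ((parts.getD i []).length : Int) < target
    · refine ⟨i, hi, he, ?_⟩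
      simp only [pvF] at hf
      rw [if_pos he] at hf
      exact (Option.some_inj.mp hf).symm
    · simp only [pvF] at hf
      rw [if_neg he] at hf
      exact absurd hf (by simp)
  · rintro ⟨i, hi, he, rfl⟩
    refine ⟨i, hi, ?_⟩
    simp only [pvF]
    rw [if_pos he]

lemma pvLst_split (k' : Nat) (target : Int) (parts : List (List Int)) (sums : List Int) (j : Nat)
    (hj : j < k') (he : ((parts.getD j []).length : Int) < target) :
    pvLst k' target parts sums =
      (List.range' 0 j).filterMap (pvF target parts sums) ++
        (sums.getD j 0, (j : Int)) :: (List.range' (j + 1) (k' - j - 1)).filterMap (pvF target parts sums) := by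
  rw [pvLst, pvRange_split k' j hj, List.filterMap_append, List.filterMap_cons]
  have : pvF target parts sums j = some (sums.getD j 0, (j : Int)) := by
    simp only [pvF]; rw [if_pos he]
  rw [this]

lemma pvSeg_congr (target : Int) (parts : List (List Int)) (sums : List Int) (j : Nat)
    (v : List Int) (w : Int) (s n : Nat) (hout : j < s ∨ s + n ≤ j) :
    (List.range' s n).filterMap (pvF target (parts.set j v) (sums.set j w)) =
      (List.range' s n).filterMap (pvF target parts sums) := by
  apply List.filterMap_congr
  intro i hi
  have hb := List.mem_range'_1.mp hi
  have hne : i ≠ j := by omega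
  simp only [pvF]
  rw [pvGetD_set_ne parts j i v [] hne, pvGetD_set_ne sums j i w 0 hne]

lemma pvCap_update (k' : Nat) (target : Int) (parts : List (List Int)) (j : Nat)
    (hj : j < k') (hlen : j < parts.length) (x : Int) :
    pvCap k' target (parts.set j ((parts.getD j []) ++ [x])) = pvCap k' target parts - 1 := by
  unfold pvCap
  rw [pvRange_split k' j hj]
  simp only [List.map_append, List.map_cons, List.sum_append, List.sum_cons]
  have h1 : ∀ s n : Nat, (j < s ∨ s + n ≤ j) →
      (List.range' s n).map (fun i => target - (((parts.set j ((parts.getD j []) ++ [x])).getD i []).length : Int)) =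
      (List.range' s n).map (fun i => target - ((parts.getD i []).length : Int)) := by
    intro s n hout
    apply List.map_congr_left
    intro i hi
    have hb := List.mem_range'_1.mp hi
    rw [pvGetD_set_ne parts j i _ [] (by omega)]
  rw [h1 0 j (by omega), h1 (j+1) (k'-j-1) (by omega), pvGetD_set_self parts j _ [] hlen]
  simp only [List.length_append, List.length_cons, List.length_nil]
  push_cast
  ring

lemma pvSum_nonpos : ∀ l : List Int, (∀ x ∈ l, x ≤ 0) → l.sum ≤ 0 := by
  intro l
  induction l with
  | nil => simp
  | cons x t ih =>
      intro h
      simp only [List.sum_cons]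
      have := h x (by simp)
      have := ih (fun y hy => h y (by simp [hy]))
      omega

lemma pvCap_pos_elig (k' : Nat) (target : Int) (parts : List (List Int))
    (hb : ∀ i, i < k' → ((parts.getD i []).length : Int) ≤ target)
    (hpos : 0 < pvCap k' target parts) :
    ∃ i, i < k' ∧ ((parts.getD i []).length : Int) < target := by
  by_contra hno
  push_neg at hno
  have : pvCap k' target parts ≤ 0 := by
    apply pvSum_nonpos
    intro x hx
    obtain ⟨i, hi, rfl⟩ := List.mem_map.mp hx
    have := hno i (List.mem_range.mp hi)
    omega
  omega
lemma pvBest_spec (parts : List (List Int)) (sums : List Int) (target : Int) : ∀ n : Nat,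
    ((∀ i, i < n → ¬ (((parts.getD i []).length : Int) < target)) → pvBest parts sums target n = -1) ∧
    ((∃ i, i < n ∧ ((parts.getD i []).length : Int) < target) →
       0 ≤ pvBest parts sums target n ∧ (pvBest parts sums target n).toNat < n ∧
       ((parts.getD (pvBest parts sums target n).toNat []).length : Int) < target ∧
       ∀ i, i < n → ((parts.getD i []).length : Int) < target →
         sums.getD (pvBest parts sums target n).toNat 0 ≤ sums.getD i 0 ∧
         (sums.getD (pvBest parts sums target n).toNat 0 = sums.getD i 0 → (pvBest parts sums target n).toNat ≤ i)) := by
  intro n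
  induction n with
  | zero => exact ⟨fun _ => rfl, by rintro ⟨i, hi, _⟩; omega⟩
  | succ n ih =>
      obtain ⟨ih1, ih2⟩ := ih
      have hstep : pvBest parts sums target (n + 1) =
          (fun best i => if ((parts.getD i []).length : Int) < target ∧
              (best < 0 ∨ sums.getD i 0 < sums.getD best.toNat 0) then (i : Int) else best)
            (pvBest parts sums target n) n := by
        unfold pvBest
        rw [List.range_succ, List.foldl_append, List.foldl_cons, List.foldl_nil]
      by_cases hen : ((parts.getD n []).length : Int) < target
      · by_cases hex : ∃ i, i < n ∧ ((parts.getD i []).length : Int) < target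
        · obtain ⟨h0, hlt, helig, hmin⟩ := ih2 hex
          constructor
          · intro hall
            exact absurd hen (hall n (by omega))
          · intro _
            by_cases hcmp : sums.getD n 0 < sums.getD (pvBest parts sums target n).toNat 0
            · have hres : pvBest parts sums target (n + 1) = (n : Int) := by
                rw [hstep]; simp only
                rw [if_pos ⟨hen, Or.inr hcmp⟩]
              rw [hres]
              refine ⟨by omega, by simp, by simpa using hen, ?_⟩
              intro i hi he
              simp only [Int.toNat_natCast]
              rcases Nat.lt_or_ge i n with hin | hin
              · have := hmin i hin he
                constructor
                · omega
                · intro heq; omega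
              · have : i = n := by omega
                subst this
                exact ⟨le_refl _, fun _ => le_refl _⟩
            · have hres : pvBest parts sums target (n + 1) = pvBest parts sums target n := by
                rw [hstep]; simp only
                rw [if_neg (by push_neg; intro _; constructor <;> omega)]
              rw [hres]
              refine ⟨h0, by omega, helig, ?_⟩
              intro i hi he
              rcases Nat.lt_or_ge i n with hin | hin
              · exact hmin i hin he
              · have : i = n := by omega
                subst this
                constructor
                · omega
                · intro _; omega
        · push_neg at hex
          have hbn : pvBest parts sums target n = -1 := ih1 (fun i hi => by have := hex i hi; omega)
          have hres : pvBest parts sums target (n + 1) = (n : Int) := by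
            rw [hstep]; simp only
            rw [hbn, if_pos ⟨hen, Or.inl (by norm_num)⟩]
          constructor
          · intro hall
            exact absurd hen (hall n (by omega))
          · intro _
            rw [hres]
            refine ⟨by omega, by simp, by simpa using hen, ?_⟩
            intro i hi he
            simp only [Int.toNat_natCast]
            rcases Nat.lt_or_ge i n with hin | hin
            · have := hex i hin; omega
            · have : i = n := by omega
              subst this
              exact ⟨le_refl _, fun _ => le_refl _⟩
      · have hres : pvBest parts sums target (n + 1) = pvBest parts sums target n := by
          rw [hstep]; simp only
          rw [if_neg (by push_neg; intro h; exact absurd h hen)]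
        constructor
        · intro hall
          rw [hres]
          exact ih1 (fun i hi => hall i (by omega))
        · rintro ⟨i, hi, he⟩
          have hin : i < n := by
            rcases Nat.lt_or_ge i n with h | h
            · exact h
            · have : i = n := by omega
              subst this; exact absurd he hen
          obtain ⟨h0, hlt, helig, hmin⟩ := ih2 ⟨i, hin, he⟩
          rw [hres]
          refine ⟨h0, by omega, helig, ?_⟩
          intro i' hi' he'
          rcases Nat.lt_or_ge i' n with hin' | hin'
          · exact hmin i' hin' he'
          · have : i' = n := by omega
            subst this; exact absurd he' hen
lemma pvLexLt_irrefl (a : Int × Int) : pvLexLt a a = false := by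
  rw [pvLexLt_false_iff]; omega

lemma pvGetD_replicate (k' : Nat) (t : Int) (i : Nat) (hi : i < k') :
    (List.replicate k' t).getD i 0 = t := by
  simp [List.getD_eq_getElem?_getD, List.getElem?_replicate, hi]

lemma pvLst_split_none (k' : Nat) (target : Int) (parts : List (List Int)) (sums : List Int) (j : Nat)
    (hj : j < k') (he : ¬ ((parts.getD j []).length : Int) < target) :
    pvLst k' target parts sums =
      (List.range' 0 j).filterMap (pvF target parts sums) ++
        (List.range' (j + 1) (k' - j - 1)).filterMap (pvF target parts sums) := by
  rw [pvLst, pvRange_split k' j hj, List.filterMap_append, List.filterMap_cons]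
  have : pvF target parts sums j = none := by
    simp only [pvF]; rw [if_neg he]
  rw [this]

lemma pvLoop (k' : Nat) (target : Int) :
    ∀ (items : List (Int × Int)) (parts : List (List Int)) (heap full : List (Int × Int)) (sums : List Int),
    parts.length = k' → sums.length = k' →
    heap.Perm (pvLst k' target parts sums) →
    heap.Pairwise (fun a b => pvLexLt b a = false) →
    (∀ i, i < k' → ((parts.getD i []).length : Int) ≤ target) →
    pvCap k' target parts = (items.length : Int) →
    (items.foldl (fun st il => pvAssign st.1 st.2.1 st.2.2 (List.replicate k' target) il.1 il.2)
        (parts, heap, full)).1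
    = (items.foldl (fun (st : List (List Int) × List Int) il =>
        let b := (pvBest st.1 st.2 target k').toNat
        (st.1.set b ((st.1.getD b []) ++ [il.1]), st.2.set b ((st.2.getD b 0) + il.2)))
        (parts, sums)).1 := by
  intro items
  induction items with
  | nil => intro parts heap full sums _ _ _ _ _ _; rfl
  | cons il rest ih =>
      intro parts heap full sums hpl hsl hperm hpair hbound hcap
      obtain ⟨idx, len⟩ := il
      -- some partition is still eligible
      obtain ⟨j, hj, hej⟩ := pvCap_pos_elig k' target parts hbound (by
        rw [hcap]; simp only [List.length_cons]; push_cast; omega)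
      -- hence the heap is nonempty
      have hLne : pvLst k' target parts sums ≠ [] := by
        intro hnil
        have : (sums.getD j 0, (j : Int)) ∈ pvLst k' target parts sums :=
          pvMem_pvLst.mpr ⟨j, hj, hej, rfl⟩
        rw [hnil] at this; exact absurd this (by simp)
      obtain ⟨⟨s, sidx⟩, hrest, rfl⟩ : ∃ h t, heap = (h : Int × Int) :: t := by
        cases heap with
        | nil => exact absurd (hperm.nil_eq.symm ▸ rfl : pvLst k' target parts sums = []) hLne
        | cons h t => exact ⟨h, t, rfl⟩
      -- the heap head is an eligible (sum, index) pair
      have hmem : (s, sidx) ∈ pvLst k' target parts sums := hperm.mem_iff.mp (by simp)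
      obtain ⟨j0, hj0, hej0, hpeq⟩ := pvMem_pvLst.mp hmem
      have hs : s = sums.getD j0 0 := by simpa using congrArg Prod.fst hpeq
      have hsidx : sidx = (j0 : Int) := by simpa using congrArg Prod.snd hpeq
      -- the heap head is lex-minimal among eligible pairs
      have hminheap : ∀ y ∈ pvLst k' target parts sums, pvLexLt y (s, sidx) = false := by
        intro y hy
        rcases List.mem_cons.mp (hperm.mem_iff.mpr hy) with rfl | hy'
        · exact pvLexLt_irrefl _
        · exact (List.pairwise_cons.mp hpair).1 y hy'
      -- B's chosen index equals the heap head
      set b := pvBest parts sums target k' with hbdef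
      obtain ⟨hb0, hbk, hbe, hbmin⟩ := (pvBest_spec parts sums target k').2 ⟨j, hj, hej⟩
      have hbmem : (sums.getD b.toNat 0, (b.toNat : Int)) ∈ pvLst k' target parts sums :=
        pvMem_pvLst.mpr ⟨b.toNat, hbk, hbe, rfl⟩
      have hbminlex : ∀ y ∈ pvLst k' target parts sums,
          pvLexLt y (sums.getD b.toNat 0, (b.toNat : Int)) = false := by
        intro y hy
        obtain ⟨i, hi, hei, rfl⟩ := pvMem_pvLst.mp hy
        obtain ⟨hle, heq⟩ := hbmin i hi hei
        rw [pvLexLt_false_iff]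
        simp only
        rcases lt_or_eq_of_le hle with h | h
        · exact Or.inl h
        · exact Or.inr ⟨h, by have := heq h; omega⟩
      have hpair_eq : (sums.getD b.toNat 0, (b.toNat : Int)) = (s, sidx) :=
        pvLexLt_antisymm (hminheap _ hbmem) (hbminlex _ hmem)
      have hj0b : j0 = b.toNat := by
        have := congrArg Prod.snd hpair_eq
        simp only [hsidx] at this
        exact_mod_cast this.symm
      have hsb : s = sums.getD b.toNat 0 := (congrArg Prod.fst hpair_eq).symm
      -- state after this item
      set parts' := parts.set j0 ((parts.getD j0 []) ++ [idx]) with hparts'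
      set sums' := sums.set j0 ((sums.getD j0 0) + len) with hsums'
      -- A's step
      have hsz : (List.replicate k' target).getD (sidx.toNat) 0 = target := by
        rw [hsidx]; simp only [Int.toNat_natCast]
        exact pvGetD_replicate k' target j0 hj0
      have hAstep : pvAssign parts ((s, sidx) :: hrest) full (List.replicate k' target) idx len =
          (parts', (if ((parts'.getD j0 []).length : Int) < target then
              pvHeapPush hrest (s + len, sidx) else hrest), full) := by
        rw [pvAssign]
        simp only [hsidx, Int.toNat_natCast]
        rw [pvGetD_replicate k' target j0 hj0, if_pos hej0]
      -- split the eligible list at j0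
      have hsplit := pvLst_split k' target parts sums j0 hj0 hej0
      have hrestperm : hrest.Perm ((List.range' 0 j0).filterMap (pvF target parts sums) ++
          (List.range' (j0 + 1) (k' - j0 - 1)).filterMap (pvF target parts sums)) := by
        have h1 : ((s, sidx) :: hrest).Perm
            ((sums.getD j0 0, (j0 : Int)) :: ((List.range' 0 j0).filterMap (pvF target parts sums) ++
              (List.range' (j0 + 1) (k' - j0 - 1)).filterMap (pvF target parts sums))) :=
          (hperm.trans (hsplit ▸ List.Perm.refl _)).trans List.perm_middle
        have h2 : (s, sidx) = (sums.getD j0 0, (j0 : Int)) := by rw [hs, hsidx]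
        rw [h2] at h1
        exact h1.cons_inv
      have hseg1 : (List.range' 0 j0).filterMap (pvF target parts' sums') =
          (List.range' 0 j0).filterMap (pvF target parts sums) :=
        pvSeg_congr target parts sums j0 _ _ 0 j0 (by omega)
      have hseg2 : (List.range' (j0 + 1) (k' - j0 - 1)).filterMap (pvF target parts' sums') =
          (List.range' (j0 + 1) (k' - j0 - 1)).filterMap (pvF target parts sums) :=
        pvSeg_congr target parts sums j0 _ _ (j0 + 1) (k' - j0 - 1) (by omega)
      have hj0lt : j0 < parts.length := by omega
      have hj0lts : j0 < sums.length := by omega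
      have hgps : parts'.getD j0 [] = (parts.getD j0 []) ++ [idx] :=
        pvGetD_set_self parts j0 _ [] hj0lt
      have hgss : sums'.getD j0 0 = (sums.getD j0 0) + len :=
        pvGetD_set_self sums j0 _ 0 hj0lts
      -- the new heap is a permutation of the new eligible list, and stays sorted
      have hpair' : hrest.Pairwise (fun a b => pvLexLt b a = false) := (List.pairwise_cons.mp hpair).2
      have hinv' : (if ((parts'.getD j0 []).length : Int) < target then
            pvHeapPush hrest (s + len, sidx) else hrest).Perm (pvLst k' target parts' sums') ∧
          (if ((parts'.getD j0 []).length : Int) < target then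
            pvHeapPush hrest (s + len, sidx) else hrest).Pairwise (fun a b => pvLexLt b a = false) := by
        by_cases he' : ((parts'.getD j0 []).length : Int) < target
        · rw [if_pos he']
          have hsplit' := pvLst_split k' target parts' sums' j0 hj0 he'
          constructor
          · refine ((pvInsertBy_perm _ hrest).trans ?_)
            rw [hsplit', hseg1, hseg2, hgss, ← hs, hsidx]
            exact ((hrestperm.cons _).trans List.perm_middle.symm)
          · exact pvInsertBy_pairwise _ hrest hpair'
        · rw [if_neg he']
          have hsplit' := pvLst_split_none k' target parts' sums' j0 hj0 he'
          constructor
          · rw [hsplit', hseg1, hseg2]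
            exact hrestperm
          · exact hpair'
      -- finish by the induction hypothesis
      have hBbest : (pvBest parts sums target k').toNat = j0 := by rw [← hbdef]; exact hj0b.symm
      simp only [List.foldl_cons]
      rw [hAstep, hBbest]
      apply ih parts' _ full sums'
      · rw [hparts']; simp [hpl]
      · rw [hsums']; simp [hsl]
      · exact hinv'.1
      · exact hinv'.2
      · intro i hi
        by_cases hij : i = j0
        · subst hij
          rw [hgps]
          simp only [List.length_append, List.length_cons, List.length_nil]
          push_cast
          omega
        · rw [hparts', pvGetD_set_ne parts j0 i _ [] hij]
          exact hbound i hi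
      · rw [hparts', pvCap_update k' target parts j0 hj0 hj0lt idx, hcap]
        simp only [List.length_cons]
        push_cast
        ring
theorem pvFinal (seqlen : List Int) (k : Int) (h1 : 0 < k)
    (h2 : PySem.Int.mod ((seqlen.length : Int)) k = 0) :
    get_seqlen_balanced_partitions_constrained_lpt seqlen k =
      get_seqlen_balanced_partitions_constrained_lpt_alt seqlen k := by
  have hk : ¬ (k ≤ 0) := by omega
  have hm : ¬ (PySem.Int.mod ((seqlen.length : Int)) k ≠ 0) := by simpa using h2
  simp only [get_seqlen_balanced_partitions_constrained_lpt,
    get_seqlen_balanced_partitions_constrained_lpt_alt]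
  rw [if_neg hk, if_neg hm, if_neg hk, if_neg hm]
  by_cases hnil : seqlen = []
  · subst hnil
    rfl
  · have hn : 0 < (seqlen.length : Int) := by
      have := List.length_pos_iff.mpr hnil
      omega
    have hdvd : k ∣ (seqlen.length : Int) := (PySem.Int.mod_eq_zero_iff_dvd _ _).mp h2
    have hkn : k ≤ (seqlen.length : Int) := Int.le_of_dvd hn hdvd
    have hrem0 : (PySem.Int.mod ((seqlen.length : Int)) k).toNat = 0 := by rw [h2]; rfl
    rw [hrem0]
    simp only [List.replicate_zero, List.nil_append, Nat.sub_zero]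
    set n : Int := (seqlen.length : Int) with hndef
    set target : Int := PySem.Int.floordiv n k with htdef
    have htpos : 1 ≤ target := by
      rw [htdef, PySem.Int.le_floordiv_iff_mul_le h1]
      omega
    set k' : Nat := k.toNat with hk'def
    have hk'pos : 0 < k' := by omega
    have hkk' : (k' : Int) = k := Int.toNat_of_nonneg (by omega)
    have hgd0 : ∀ i, i < k' → ((List.replicate k' ([] : List Int)).getD i []) = [] := by
      intro i hi
      simp [List.getD_eq_getElem?_getD, List.getElem?_replicate, hi]
    have hL0 : pvLst k' target (List.replicate k' ([] : List Int)) (List.replicate k' (0 : Int)) =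
        (List.range k').map (fun (i : Nat) => ((0 : Int), (i : Int))) := by
      rw [pvLst, ← List.filterMap_eq_map]
      apply List.filterMap_congr
      intro i hi
      have hik : i < k' := List.mem_range.mp hi
      simp only [pvF, hgd0 i hik, pvGetD_replicate k' (0:Int) i hik]
      rw [if_pos (by simpa using htpos)]
      rfl
    have hcap0 : pvCap k' target (List.replicate k' ([] : List Int)) =
        ((PySem.List.sorted (PySem.List.enumerate seqlen) (fun x => x.2) true).length : Int) := by
      rw [pvCap]
      have hc : ((List.range k').map (fun i => target - (((List.replicate k' ([] : List Int)).getD i []).length : Int))) =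
          (List.range k').map (fun _ => target) := by
        apply List.map_congr_left
        intro i hi
        rw [hgd0 i (List.mem_range.mp hi)]
        simp
      rw [hc]
      have hlen : (PySem.List.sorted (PySem.List.enumerate seqlen) (fun x => x.2) true).length = seqlen.length := by
        rw [PySem.List.length_sorted, PySem.List.length_enumerate]
      rw [hlen]
      rw [List.map_const', List.sum_replicate, nsmul_eq_mul]
      have : k * target = n := by
        rw [htdef, PySem.Int.floordiv_eq_ediv_of_pos h1]
        exact Int.mul_ediv_cancel' hdvd
      simp only [List.length_range]
      rw [hkk']
      omega
    exact pvLoop k' target (PySem.List.sorted (PySem.List.enumerate seqlen) (fun x => x.2) true)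
      (List.replicate k' []) _ [] (List.replicate k' 0)
      (by simp) (by simp)
      (hL0 ▸ pvHeapify_perm _)
      (pvHeapify_pairwise _)
      (by intro i hi; rw [hgd0 i hi]; simp; omega)
      hcap0

-- ===== VERDICT (by name: the statement is the Claim_ definition above) =====
theorem get_seqlen_balanced_partitions_constrained_lpt_spec : Claim_equal_get_seqlen_balanced_partitions_constrained_lpt := by
  intro seqlen_list k_partitions _ hpre
  obtain ⟨h1, h2⟩ := hpre
  unfold Spec_get_seqlen_balanced_partitions_constrained_lpt
  exact pvFinal seqlen_list k_partitions h1 h2
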